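-- pv_equiv track=rewrite | github.com/Stardust-lf/fhe-reliability-gpu | rfhe_framewk/src/baseConv.py | group_multiply
-- ===== SOURCE A (Python) =====
-- def group_multiply(lst, n):
--     result = []
--     for i in range(0, len(lst), n):
--         group = lst[i : i + n]
--         if len(group) < n:
--             break
--         product = 1
--         for x in group:
--             product *= x
--         result.append(product)
--     return result
-- ===== SOURCE B (Python) =====
-- def group_multiply(lst, n):
--     # One streaming pass with a running product and a count: no index
--     # arithmetic, no slicing.  Emits a product each time a group fills;
--     # a short tail (or a non-positive n, which never fills) emits nothing.
--     result = []
--     acc = 1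
--     cnt = 0
--     for x in lst:
--         if cnt + 1 == n:
--             result.append(acc * x)
--             acc = 1
--             cnt = 0
--         else:
--             acc *= x
--             cnt += 1
--     return result
-- ===== Notes on version B (the rewrite author's own statement) =====
-- stated objective: alternative
-- what changed: replaces index-stepping with slice extraction and an inner product loop by a single streaming pass keeping a running product and element count, emitting a product each time a group fills
import Mathlib
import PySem

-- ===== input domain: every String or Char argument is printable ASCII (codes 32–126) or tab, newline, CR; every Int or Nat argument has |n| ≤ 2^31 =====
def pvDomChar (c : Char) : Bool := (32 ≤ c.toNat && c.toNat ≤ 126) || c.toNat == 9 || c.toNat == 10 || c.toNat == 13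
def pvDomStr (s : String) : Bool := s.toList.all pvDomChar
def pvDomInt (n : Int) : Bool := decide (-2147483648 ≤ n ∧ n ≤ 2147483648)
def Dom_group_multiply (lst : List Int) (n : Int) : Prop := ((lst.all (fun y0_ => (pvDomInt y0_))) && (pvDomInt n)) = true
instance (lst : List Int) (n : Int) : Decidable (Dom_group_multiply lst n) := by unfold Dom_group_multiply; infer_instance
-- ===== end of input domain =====

-- B replaces A's index stepping + slicing + inner product loop by a single
-- streaming pass with a running product and count (alternative decomposition,
-- same cost); on n = 0, excluded by Pre_, A raises ValueError and B returns [].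

-- ===== PORT A =====
-- loop over range(0, len(lst), n); 'break' = return the result accumulated so far
def groupMultiplyLoopA (lst : List Int) (n : Int) : List Int → List Int → List Int
  | [], result => result
  | i :: rest, result =>
    let group := PySem.List.slice lst (some i) (some (i + n))
    if (group.length : Int) < n then result
    else groupMultiplyLoopA lst n rest (result ++ [group.foldl (· * ·) 1])

def group_multiply (lst : List Int) (n : Int) : List Int :=
  groupMultiplyLoopA lst n (PySem.List.pyRange 0 lst.length n) []

-- ===== PORT B =====
-- single pass: acc = running product of the current partial group, cnt = its size
def groupMultiplyLoopB (n : Int) : List Int → Int → Int → List Int → List Int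
  | [], _acc, _cnt, result => result
  | x :: xs, acc, cnt, result =>
    if cnt + 1 = n then groupMultiplyLoopB n xs 1 0 (result ++ [acc * x])
    else groupMultiplyLoopB n xs (acc * x) (cnt + 1) result

def group_multiply_alt (lst : List Int) (n : Int) : List Int :=
  groupMultiplyLoopB n lst 1 0 []

-- ===== PRECONDITION & SPEC =====
-- Pre_ excludes only n = 0, where A raises ValueError (range() arg 3 must not be zero).
def Pre_group_multiply (lst : List Int) (n : Int) : Prop := n ≠ 0
instance (lst : List Int) (n : Int) : Decidable (Pre_group_multiply lst n) := by unfold Pre_group_multiply; infer_instance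
def pvWitness_group_multiply : List Int × Int := ([1, 2, 3, 4, 5], 2)

def Spec_group_multiply (lst : List Int) (n : Int) (out : List Int) : Prop := out = group_multiply_alt lst n
instance (lst : List Int) (n : Int) (out : List Int) : Decidable (Spec_group_multiply lst n out) := by unfold Spec_group_multiply; infer_instance

-- ===== CLAIM (what is proved, stated in full; the proofs are below) =====
def Claim_equal_group_multiply : Prop := ∀ (lst : List Int) (n : Int), Dom_group_multiply lst n → Pre_group_multiply lst n → Spec_group_multiply lst n (group_multiply lst n)

-- ===== LEMMAS AND PROOFS =====

-- common specification: products of full chunks of size m, short tail dropped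
def chunksProd (m : Nat) (xs : List Int) : List Int :=
  if h : xs.length < m ∨ m = 0 then []
  else ((xs.take m).foldl (· * ·) 1) :: chunksProd m (xs.drop m)
termination_by xs.length
decreasing_by simp; omega

theorem foldl_mul_acc (xs : List Int) (a : Int) :
    xs.foldl (· * ·) a = a * xs.foldl (· * ·) 1 := by
  induction xs generalizing a with
  | nil => simp
  | cons x t ih =>
    show List.foldl (· * ·) (a * x) t = a * List.foldl (· * ·) (1 * x) t
    rw [ih (a * x), ih (1 * x)]; ring

-- ---- side A ----

theorem pyRange_pos_eq_nil (a b s : Int) (hs : 0 < s) (h : b ≤ a) :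
    PySem.List.pyRange a b s = [] := by
  rw [PySem.List.pyRange_of_pos a b hs]
  simp [show ¬ a < b by omega]

theorem pyRange_pos_cons (a b s : Int) (hs : 0 < s) (h : a < b) :
    PySem.List.pyRange a b s = a :: PySem.List.pyRange (a + s) b s := by
  rw [PySem.List.pyRange_of_pos a b hs, PySem.List.pyRange_of_pos (a + s) b hs]
  have hkey : ((b - a + s - 1) / s).toNat
      = (if a + s < b then ((b - (a + s) + s - 1) / s).toNat else 0) + 1 := by
    have h1 : b - a + s - 1 = (b - a - 1) + 1 * s := by ring
    have h2 : (b - a + s - 1) / s = (b - a - 1) / s + 1 := by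
      rw [h1, Int.add_mul_ediv_right _ _ (by omega : s ≠ 0)]
    have hq : 0 ≤ (b - a - 1) / s := Int.ediv_nonneg (by omega) (by omega)
    by_cases hc : a + s < b
    · simp [hc]
      have : b - (a + s) + s - 1 = b - a - 1 := by ring
      rw [this]; omega
    · simp [hc]
      have hz : (b - a - 1) / s = 0 := Int.ediv_eq_zero_of_lt (by omega) (by omega)
      omega
  rw [hkey, if_pos h, List.range_succ_eq_map]
  simp only [List.map_cons, List.map_map, Nat.cast_zero, mul_zero, add_zero]
  congr 1
  apply List.map_congr_left
  intro k _
  simp only [Function.comp_apply]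
  push_cast
  ring

theorem loopA_eq_chunks (m : Nat) (hm : 0 < m) (lst : List Int) :
    ∀ (j : Nat) (res : List Int),
      groupMultiplyLoopA lst (m : Int) (PySem.List.pyRange (j : Int) (lst.length : Int) (m : Int)) res
        = res ++ chunksProd m (lst.drop j) := by
  intro j
  induction hw : lst.length - j using Nat.strong_induction_on generalizing j with
  | _ fuel ih =>
  intro res
  by_cases hj : (lst.length : Int) ≤ (j : Int)
  · rw [pyRange_pos_eq_nil _ _ _ (by exact_mod_cast hm) hj]
    have hd : lst.drop j = [] := List.drop_eq_nil_of_le (by exact_mod_cast hj)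
    rw [hd]
    rw [chunksProd]
    simp [groupMultiplyLoopA, hm]
  · have hj' : (j : Int) < (lst.length : Int) := by omega
    replace hj := hj'
    rw [pyRange_pos_cons _ _ _ (by exact_mod_cast hm) hj]
    rw [groupMultiplyLoopA]
    have hslice : PySem.List.slice lst (some (j : Int)) (some ((j : Int) + (m : Int)))
        = (lst.drop j).take m := PySem.List.slice_natCast_add lst j m
    by_cases hshort : (((PySem.List.slice lst (some (j : Int)) (some ((j : Int) + (m : Int)))).length : Int) < (m : Int))
    · simp only [hshort, if_pos]
      rw [hslice] at hshort
      have hlen : (lst.drop j).length < m := by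
        simp at hshort ⊢
        omega
      rw [chunksProd, dif_pos (Or.inl hlen)]
      simp
    · simp only [hshort, if_neg, not_false_iff]
      rw [hslice] at hshort ⊢
      have hlen : ¬ (lst.drop j).length < m := by
        simp at hshort
        simp
        omega
      have hcast : (j : Int) + (m : Int) = ((j + m : Nat) : Int) := by push_cast; ring
      rw [hcast]
      have hjm : lst.length - (j + m) < fuel := by
        have hjl : j < lst.length := by exact_mod_cast hj
        omega
      rw [ih _ hjm (j + m) rfl]
      have hrhs : chunksProd m (lst.drop j) = ((lst.drop j).take m).foldl (· * ·) 1
          :: chunksProd m (lst.drop (j + m)) := by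
        rw [chunksProd, dif_neg (by simp only [not_or]; exact ⟨hlen, hm.ne'⟩)]
        rw [List.drop_drop]
      rw [hrhs, List.append_assoc]
      rfl

-- ---- side B ----

theorem loopB_neg (n : Int) (hn : n < 0) :
    ∀ (xs : List Int) (acc : Int) (cnt : Nat) (res : List Int),
      groupMultiplyLoopB n xs acc (cnt : Int) res = res := by
  intro xs
  induction xs with
  | nil => intro acc cnt res; rfl
  | cons x t ih =>
    intro acc cnt res
    rw [groupMultiplyLoopB]
    rw [if_neg (by omega)]
    have : (cnt : Int) + 1 = ((cnt + 1 : Nat) : Int) := by push_cast; ring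
    rw [this, ih]

-- partial-group invariant: acc holds the product of the cnt elements already seen
def partialChunks (m : Nat) (xs : List Int) (acc : Int) (cnt : Nat) : List Int :=
  if xs.length < m - cnt then []
  else (acc * (xs.take (m - cnt)).foldl (· * ·) 1) :: chunksProd m (xs.drop (m - cnt))

theorem partialChunks_zero (m : Nat) (hm : 0 < m) (xs : List Int) :
    partialChunks m xs 1 0 = chunksProd m xs := by
  rw [partialChunks, Nat.sub_zero]
  by_cases hl : xs.length < m
  · rw [if_pos hl, chunksProd, dif_pos (Or.inl hl)]
  · rw [if_neg hl]
    conv_rhs => rw [chunksProd]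
    rw [dif_neg (by simp only [not_or]; exact ⟨hl, hm.ne'⟩)]
    simp

theorem loopB_pos (m : Nat) (hm : 0 < m) :
    ∀ (xs : List Int) (acc : Int) (cnt : Nat) (res : List Int), cnt < m →
      groupMultiplyLoopB (m : Int) xs acc (cnt : Int) res = res ++ partialChunks m xs acc cnt := by
  intro xs
  induction xs with
  | nil =>
    intro acc cnt res hc
    rw [groupMultiplyLoopB, partialChunks]
    simp [show 0 < m - cnt by omega]
  | cons x t ih =>
    intro acc cnt res hc
    rw [groupMultiplyLoopB]
    by_cases hfull : cnt + 1 = m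
    · rw [if_pos (by exact_mod_cast hfull)]
      have hih := ih 1 0 (res ++ [acc * x]) hm
      simp only [Nat.cast_zero] at hih
      rw [hih, partialChunks_zero m hm]
      have hrhs : partialChunks m (x :: t) acc cnt = (acc * x) :: chunksProd m t := by
        have hmc : m - cnt = 1 := by omega
        rw [partialChunks, hmc]
        simp
      rw [hrhs, List.append_assoc]
      rfl
    · rw [if_neg (by omega : ¬ ((cnt : Int) + 1 = (m : Int)))]
      have hcast : (cnt : Int) + 1 = ((cnt + 1 : Nat) : Int) := by push_cast; ring
      rw [hcast, ih (acc * x) (cnt + 1) res (by omega)]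
      congr 1
      have heq : m - cnt = (m - (cnt + 1)) + 1 := by omega
      rw [partialChunks, partialChunks, heq]
      by_cases hl : t.length < m - (cnt + 1)
      · rw [if_pos hl, if_pos (by simpa using hl)]
      · rw [if_neg hl, if_neg (by simpa using hl)]
        rw [List.take_succ_cons, List.drop_succ_cons]
        simp only [List.foldl_cons]
        congr 1
        rw [foldl_mul_acc _ (1 * x)]
        ring

-- ===== VERDICT (by name: the statement is the Claim_ definition above) =====
theorem group_multiply_spec : Claim_equal_group_multiply := by
  intro lst n _hdom hpre
  unfold Spec_group_multiply group_multiply group_multiply_alt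
  rcases lt_trichotomy n 0 with hneg | hzero | hpos
  · have hA : PySem.List.pyRange 0 (lst.length : Int) n = [] := by
      unfold PySem.List.pyRange
      simp [show ¬ n = 0 from hpre, show ¬ 0 < n by omega,
            show ¬ (lst.length : Int) < 0 by omega]
    rw [hA]
    have := loopB_neg n hneg lst 1 0 []
    simp at this
    simp [groupMultiplyLoopA, this]
  · exact absurd hzero hpre
  · obtain ⟨m, hm⟩ : ∃ m : Nat, n = (m : Int) := ⟨n.toNat, by omega⟩
    subst hm
    have hm0 : 0 < m := by exact_mod_cast hpos
    have hA := loopA_eq_chunks m hm0 lst 0 []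
    have hB := loopB_pos m hm0 lst 1 0 [] hm0
    simp only [Nat.cast_zero, List.drop_zero, List.nil_append] at hA hB
    rw [hA, hB, partialChunks_zero m hm0]
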